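-- pv_equiv track=rewrite | github.com/artbohr/Codewars-Algorithms-Python- | 7-kyu/seven-ate-9.py | seven_ate9
-- ===== SOURCE A (Python) =====
-- def seven_ate9(str_):
--     output = ''
--     str = '_{}_'.format(str_)
--
--     for c, x in enumerate(str):
--         if x == '9' and str[c-1] == '7'and str[c+1] == '7':
--             continue
--         output += x
--
--     return output[1:-1]
-- ===== SOURCE B (Python) =====
-- def seven_ate9(str_):
--     # Consume the string left to right: whenever '797' starts at the cursor,
--     # emit '7' and jump past the '79', re-examining the trailing '7'.
--     s = '{}'.format(str_)
--     out = []
--     i = 0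
--     n = len(s)
--     while i < n:
--         if s[i:i+3] == '797':
--             out.append('7')
--             i += 2
--         else:
--             out.append(s[i])
--             i += 1
--     return ''.join(out)
-- ===== Notes on version B (the rewrite author's own statement) =====
-- stated objective: alternative
-- what changed: Replaces A's sentinel-padded per-character scan that tests both neighbours of each '9' by index arithmetic (plus a final slice to strip the pads) with a cursor automaton that matches the literal substring '797' at the cursor, emits '7' and jumps the cursor past '79', re-examining the trailing '7'; no padding, no neighbour indexing, no slicing.
import Mathlib
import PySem

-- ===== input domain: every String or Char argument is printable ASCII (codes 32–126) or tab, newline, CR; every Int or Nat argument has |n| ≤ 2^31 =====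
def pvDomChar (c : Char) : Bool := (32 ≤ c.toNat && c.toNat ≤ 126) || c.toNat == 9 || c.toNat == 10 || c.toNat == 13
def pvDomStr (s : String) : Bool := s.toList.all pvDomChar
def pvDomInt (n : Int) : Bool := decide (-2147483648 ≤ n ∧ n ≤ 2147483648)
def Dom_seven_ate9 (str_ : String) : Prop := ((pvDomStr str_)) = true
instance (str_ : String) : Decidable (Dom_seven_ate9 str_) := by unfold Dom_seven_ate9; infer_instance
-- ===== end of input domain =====

-- B replaces A's sentinel-padded neighbour-checking scan with a cursor automaton that
-- consumes the literal pattern '797', emitting '7' and jumping two positions (objective: alternative).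

-- ===== PORT A =====
-- literal port of A: pad with '_', scan by enumerate with index lookups, accumulate, slice off the pads
def seven_ate9 (str_ : String) : String :=
  let s : List Char := '_' :: str_.toList ++ ['_']
  let output : List Char :=
    (PySem.List.enumerate s 0).foldl (fun out cx =>
      if cx.2 = '9' ∧ PySem.List.pyGet? s (cx.1 - 1) = some '7' ∧
          PySem.List.pyGet? s (cx.1 + 1) = some '7'
      then out else out ++ [cx.2]) []
  String.ofList (PySem.List.slice output (some 1) (some (-1)))

-- ===== PORT B =====
-- port of Source B's while loop: cursor i over s; on s[i:i+3] == '797' emit '7' and i += 2, else emit s[i] and i += 1.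
-- s[i] in the else branch is in range (i < n), so the getD default is never used.
def goB (s : List Char) (n : Nat) (i : Nat) (out : List Char) : List Char :=
  if i < n then
    if PySem.List.slice s (some (i : Int)) (some ((i : Int) + 3)) = ['7', '9', '7'] then
      goB s n (i + 2) (out ++ ['7'])
    else
      goB s n (i + 1) (out ++ [(PySem.List.pyGet? s (i : Int)).getD ' '])
  else out
termination_by n - i

def seven_ate9_alt (str_ : String) : String :=
  let s : List Char := str_.toList
  String.ofList (goB s s.length 0 [])

-- ===== PRECONDITION & SPEC =====
def Spec_seven_ate9 (str_ : String) (out : String) : Prop := out = seven_ate9_alt str_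
instance (str_ : String) (out : String) : Decidable (Spec_seven_ate9 str_ out) := by unfold Spec_seven_ate9; infer_instance

-- ===== CLAIM (what is proved, stated in full; the proofs are below) =====
def Claim_equal_seven_ate9 : Prop := ∀ (str_ : String), Dom_seven_ate9 str_ → Spec_seven_ate9 str_ (seven_ate9 str_)

-- ===== LEMMAS AND PROOFS =====

-- canonical form both ports reduce to: rewrite '7'::'9'::'7'::r to '7'::(recurse on '7'::r)
def fCanon : List Char → List Char
  | [] => []
  | c :: r =>
    if c = '7' ∧ r.take 2 = ['9', '7'] then '7' :: fCanon ('7' :: r.drop 2)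
    else c :: fCanon r
termination_by l => l.length
decreasing_by
  · rename_i h
    have : 2 ≤ r.length := by
      by_contra hlt
      have : r.take 2 = r := List.take_of_length_le (by omega)
      rw [this] at h
      rcases h with ⟨-, h2⟩
      subst h2
      simp at hlt
    simp
    omega
  · simp

-- A's triple view: (previous char, current char, next char or '_')
def tripRec : Char → List Char → List (Char × Char × Char)
  | _, [] => []
  | pr, c :: rest => (pr, c, rest.headD '_') :: tripRec c rest

def filterTrip (a : Char) (l : List Char) : List Char :=
  ((tripRec a l).filter
    (fun t => !(t.2.1 == '9' && t.1 == '7' && t.2.2 == '7'))).map (·.2.1)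

theorem foldl_if_append {α β : Type} (c : α → Prop) [DecidablePred c] (f : α → β)
    (l : List α) (acc : List β) :
    l.foldl (fun out x => if c x then out else out ++ [f x]) acc
      = acc ++ (l.filter (fun x => !decide (c x))).map f := by
  induction l generalizing acc with
  | nil => simp
  | cons x xs ih =>
    by_cases h : c x <;> simp [List.foldl, h, ih]

theorem enum_filter (p : List Char) :
    ∀ (l u : List Char) (a : Char), p = u ++ a :: (l ++ ['_']) →
    ((PySem.List.enumerate (l ++ ['_']) ((u.length : Int) + 1)).filter
        (fun cx => !decide (cx.2 = '9' ∧ PySem.List.pyGet? p (cx.1 - 1) = some '7' ∧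
            PySem.List.pyGet? p (cx.1 + 1) = some '7'))).map (·.2)
      = ((tripRec a l).filter
          (fun t => !(t.2.1 == '9' && t.1 == '7' && t.2.2 == '7'))).map (·.2.1) ++ ['_'] := by
  intro l
  induction l with
  | nil =>
    intro u a hp
    simp [PySem.List.enumerate, tripRec]
  | cons c rest ih =>
    intro u a hp
    have h1 : PySem.List.pyGet? p ((u.length : Int) + 1 - 1) = some a := by
      subst hp
      have : ((u.length : Int) + 1 - 1) = (u.length : Int) := by ring
      rw [this, PySem.List.pyGet?_natCast]
      simp
    have h2 : PySem.List.pyGet? p ((u.length : Int) + 1 + 1) = some (rest.head?.getD '_') := by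
      subst hp
      rw [show ((u.length : Int) + 1 + 1) = ((u.length + 2 : Nat) : Int) from by push_cast; ring,
          PySem.List.pyGet?_natCast, List.getElem?_append_right (by omega)]
      rw [show u.length + 2 - u.length = 2 from by omega]
      cases rest <;> rfl
    have hrec := ih (u ++ [a]) c (by simpa using hp)
    have hlen : ((u ++ [a]).length : Int) + 1 = (u.length : Int) + 1 + 1 := by
      simp only [List.length_append, List.length_cons, List.length_nil]; push_cast; ring
    rw [hlen] at hrec
    rw [show (c :: rest) ++ ['_'] = c :: (rest ++ ['_']) from rfl, PySem.List.enumerate_cons,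
        show tripRec a (c :: rest) = (a, c, rest.head?.getD '_') :: tripRec c rest from by
          simp [tripRec],
        List.filter_cons, List.filter_cons]
    simp only [h1, h2]
    by_cases hc : c = '9' ∧ a = '7' ∧ rest.head?.getD '_' = '7'
    · have hA : (!decide (c = '9' ∧ some a = some '7' ∧ some (rest.head?.getD '_') = some '7')) = false := by
        simp [hc.1, hc.2.1, hc.2.2]
      have hB : (!(c == '9' && a == '7' && rest.head?.getD '_' == '7')) = false := by
        simp [hc.1, hc.2.1, hc.2.2]
      rw [hA, hB]
      simpa using hrec
    · have h9 : ¬(c = '9' ∧ some a = some '7' ∧ some (rest.head?.getD '_') = some '7') := by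
        simpa using hc
      have hA : (!decide (c = '9' ∧ some a = some '7' ∧ some (rest.head?.getD '_') = some '7')) = true := by
        rw [decide_eq_false h9]; rfl
      have hB : (!(c == '9' && a == '7' && rest.head?.getD '_' == '7')) = true := by
        by_contra hx
        simp at hx
        exact hc ⟨hx.1.1, hx.1.2, hx.2⟩
      rw [hA, hB]
      exact congrArg (c :: ·) hrec

theorem slice_pad (m : List Char) :
    PySem.List.slice ('_' :: m ++ ['_']) (some 1) (some (-1)) = m := by
  simp [PySem.List.slice, PySem.List.clampIdx]
  rw [if_neg (show ¬((m.length : Int) + 1 < 0) from by omega), Nat.add_sub_cancel]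
  simp

-- A reduces to the triple filter with initial left context '_'
theorem A_eq_filterTrip (str_ : String) :
    seven_ate9 str_ = String.ofList (filterTrip '_' str_.toList) := by
  simp only [seven_ate9]
  rw [foldl_if_append _ (fun cx : Int × Char => cx.2), List.nil_append,
      show ('_' :: str_.toList) ++ ['_'] = '_' :: (str_.toList ++ ['_']) from rfl,
      PySem.List.enumerate_cons]
  rw [List.filter_cons]
  have h0 : (!decide ('_' = '9' ∧
      PySem.List.pyGet? ('_' :: (str_.toList ++ ['_'])) ((0 : Int) - 1) = some '7' ∧
      PySem.List.pyGet? ('_' :: (str_.toList ++ ['_'])) ((0 : Int) + 1) = some '7')) = true := by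
    simp
  rw [h0, if_pos rfl, List.map_cons]
  have hmain := enum_filter ('_' :: (str_.toList ++ ['_'])) str_.toList [] '_' rfl
  rw [show ((([] : List Char).length : Int) + 1) = ((0 : Int) + 1) from by norm_num] at hmain
  rw [hmain]
  exact congrArg String.ofList (slice_pad _)

-- the triple filter is the canonical rewriter, whenever the left context cannot complete a '797'
theorem filterTrip_cons (a c : Char) (r : List Char) :
    filterTrip a (c :: r) =
      (if c = '9' ∧ a = '7' ∧ r.headD '_' = '7' then [] else [c]) ++ filterTrip c r := by
  by_cases h : c = '9' ∧ a = '7' ∧ r.headD '_' = '7'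
  · rw [if_pos h]
    simp only [List.headD_eq_head?_getD] at h
    simp [filterTrip, tripRec, h.1, h.2.1, h.2.2]
  · rw [if_neg h]
    simp only [List.headD_eq_head?_getD] at h
    have hb : (¬c = '9' ∨ ¬a = '7') ∨ ¬r.head?.getD '_' = '7' := by tauto
    simp [filterTrip, tripRec, List.filter_cons]
    rw [if_pos hb]
    simp

theorem filterTrip_eq_fCanon :
    ∀ (n : Nat) (l : List Char) (a : Char), l.length ≤ n →
      ¬(a = '7' ∧ l.take 2 = ['9', '7']) → filterTrip a l = fCanon l := by
  intro n
  induction n with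
  | zero =>
    intro l a hn _
    have : l = [] := List.eq_nil_of_length_eq_zero (by omega)
    subst this
    simp [filterTrip, tripRec, fCanon]
  | succ n ih =>
    intro l a hn ha
    cases l with
    | nil => simp [filterTrip, tripRec, fCanon]
    | cons c r =>
      by_cases hm : c = '7' ∧ r.take 2 = ['9', '7']
      · -- match case: r = '9' :: '7' :: r2
        obtain ⟨hc, hr⟩ := hm
        obtain ⟨r2, hr2⟩ : ∃ r2, r = '9' :: '7' :: r2 := by
          cases r with
          | nil => simp at hr
          | cons x r' =>
            cases r' with
            | nil => simp at hr
            | cons y r2 =>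
              simp [List.take] at hr
              exact ⟨r2, by rw [hr.1, hr.2]⟩
        subst hr2; subst hc
        rw [filterTrip_cons, if_neg (by intro h; exact absurd h.1 (by decide))]
        rw [filterTrip_cons, if_pos (by refine ⟨rfl, rfl, rfl⟩)]
        have h97 : ¬(('9' : Char) = '7' ∧ ('7' :: r2).take 2 = ['9', '7']) := by
          intro h; exact absurd h.1 (by decide)
        rw [List.nil_append, ih ('7' :: r2) '9' (by simp at hn ⊢; omega) h97]
        rw [show fCanon ('7' :: '9' :: '7' :: r2) = '7' :: fCanon ('7' :: r2) from by
          rw [fCanon]; simp]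
        rfl
      · -- non-match case
        have hnot : ¬(c = '9' ∧ a = '7' ∧ r.headD '_' = '7') := by
          intro ⟨h1, h2, h3⟩
          apply ha
          refine ⟨h2, ?_⟩
          cases r with
          | nil => exact absurd h3 (by decide)
          | cons x r' => simp at h3 ⊢; exact ⟨h1, h3⟩
        rw [filterTrip_cons, if_neg hnot, ih r c (by simp at hn; omega) hm]
        rw [fCanon, if_neg hm]
        rfl

-- B's cursor loop computes the canonical rewriter on the remaining suffix
theorem goB_eq (s : List Char) :
    ∀ (k i : Nat) (out : List Char), s.length - i ≤ k →
      goB s s.length i out = out ++ fCanon (s.drop i) := by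
  intro k
  induction k with
  | zero =>
    intro i out hk
    rw [goB, if_neg (by omega)]
    rw [List.drop_of_length_le (by omega)]
    simp [fCanon]
  | succ k ih =>
    intro i out hk
    by_cases hi : i < s.length
    · have hsl : PySem.List.slice s (some (i : Int)) (some ((i : Int) + 3))
          = (s.drop i).take 3 := by
        rw [show ((i : Int) + 3) = ((i + 3 : Nat) : Int) from by push_cast; ring,
            PySem.List.slice_natCast]
        rw [show i + 3 - i = 3 from by omega]
      obtain ⟨c, rest, hdrop⟩ : ∃ c rest, s.drop i = c :: rest := by
        cases hd : s.drop i with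
        | nil => have := List.drop_eq_nil_iff.mp hd; omega
        | cons c rest => exact ⟨c, rest, rfl⟩
      have hget : (PySem.List.pyGet? s (i : Int)).getD ' ' = c := by
        rw [PySem.List.pyGet?_natCast]
        have : s[i]? = (s.drop i).head? := by
          rw [List.head?_drop]
        rw [this, hdrop]
        rfl
      rw [goB, if_pos hi, hsl, hdrop]
      by_cases hm : (c :: rest).take 3 = ['7', '9', '7']
      · obtain ⟨hc7, r2, hrest⟩ : c = '7' ∧ ∃ r2, rest = '9' :: '7' :: r2 := by
          cases rest with
          | nil => simp [List.take] at hm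
          | cons x r' =>
            cases r' with
            | nil => simp [List.take] at hm
            | cons y r2 =>
              simp [List.take] at hm
              exact ⟨hm.1, r2, by rw [hm.2.1, hm.2.2]⟩
        rw [if_pos (by rw [hrest, hc7]; rfl)]
        rw [ih (i + 2) (out ++ ['7']) (by omega)]
        have hdrop2 : s.drop (i + 2) = '7' :: r2 := by
          have : s.drop (i + 2) = (s.drop i).drop 2 := by
            rw [List.drop_drop]
          rw [this, hdrop, hrest]
          rfl
        rw [hdrop2]
        have : fCanon (c :: rest) = '7' :: fCanon ('7' :: r2) := by
          rw [hc7, hrest, fCanon]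
          simp
        rw [this]
        simp
      · rw [if_neg hm]
        rw [ih (i + 1) _ (by omega)]
        have hdrop1 : s.drop (i + 1) = rest := by
          have : s.drop (i + 1) = (s.drop i).drop 1 := by
            rw [List.drop_drop]
          rw [this, hdrop]
          rfl
        rw [hdrop1, hget]
        have hnm : ¬(c = '7' ∧ rest.take 2 = ['9', '7']) := by
          intro ⟨h1, h2⟩
          apply hm
          cases rest with
          | nil => simp at h2
          | cons x r' =>
            cases r' with
            | nil => simp at h2
            | cons y r2 =>
              simp [List.take] at h2 ⊢
              exact ⟨h1, h2.1, h2.2⟩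
        rw [fCanon, if_neg hnm]
        simp
    · rw [goB, if_neg hi]
      rw [List.drop_of_length_le (by omega)]
      simp [fCanon]

-- ===== VERDICT (by name: the statement is the Claim_ definition above) =====
theorem seven_ate9_spec : Claim_equal_seven_ate9 := by
  intro str_ _
  show seven_ate9 str_ = seven_ate9_alt str_
  rw [A_eq_filterTrip]
  simp only [seven_ate9_alt]
  rw [goB_eq str_.toList str_.toList.length 0 [] (by omega), List.drop_zero, List.nil_append]
  rw [filterTrip_eq_fCanon str_.toList.length str_.toList '_' (by omega)
      (fun h => absurd h.1 (by decide))]
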